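-- pv_equiv track=rewrite | github.com/TessFerrandez/algorithms | contest/lc-h-2223-sum-of-scores-of-built-strings.py | sumScores
-- ===== SOURCE A (Python) =====
-- def sumScores(s: str) -> int:
--     def z_function(s):
--         n = len(s)
--         z = [0] * n
--         for i in range(1, n):
--             while i + z[i] < n and s[z[i]] == s[i + z[i]]:
--                 z[i] += 1
--         return z
--
--     return sum(z_function(s) + [0]) + len(s)
-- ===== SOURCE B (Python) =====
-- def sumScores(s: str) -> int:
--     # linear-time Z-algorithm with an [l, r) match window
--     n = len(s)
--     z = [0] * n
--     l = r = 0
--     for i in range(1, n):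
--         k = min(r - i, z[i - l]) if i < r else 0
--         while i + k < n and s[k] == s[i + k]:
--             k += 1
--         z[i] = k
--         if i + k > r:
--             l, r = i, i + k
--     return sum(z) + n
-- ===== Notes on version B (the rewrite author's own statement) =====
-- stated objective: faster
-- what changed: Replaces A's naive per-index rescan of the common prefix (restarting the comparison at 0 for every i) with the linear-time Z-algorithm that maintains an [l, r) match window and seeds each comparison from min(r - i, z[i - l]).
import Mathlib
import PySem

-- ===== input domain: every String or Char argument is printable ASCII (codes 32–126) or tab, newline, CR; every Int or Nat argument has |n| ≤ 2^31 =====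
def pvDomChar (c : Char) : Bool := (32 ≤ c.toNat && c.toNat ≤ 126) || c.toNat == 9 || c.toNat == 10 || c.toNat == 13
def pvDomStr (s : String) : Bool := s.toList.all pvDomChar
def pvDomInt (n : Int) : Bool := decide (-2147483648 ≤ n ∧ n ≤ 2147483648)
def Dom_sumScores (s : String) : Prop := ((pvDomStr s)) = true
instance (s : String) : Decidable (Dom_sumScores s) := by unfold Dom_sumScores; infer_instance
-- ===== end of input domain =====

-- B replaces A's naive per-index prefix matching (O(n^2)) by the linear-time
-- Z-algorithm with an [l, r) match window; measured asymptotically faster.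

-- ===== PORT A =====
-- the shared inner `while i + k < n and s[k] == s[i + k]: k += 1` loop of both
-- Pythons (A starts it at k = z[i] = 0, B at the window-derived k); the Nat
-- fuel only bounds the recursion, the loop always stops before it runs out
def pvExtend (cs : List Char) (n i k : Int) : Nat → Int
  | 0 => k
  | fuel + 1 =>
    if i + k < n ∧ PySem.List.pyGet? cs k = PySem.List.pyGet? cs (i + k)
    then pvExtend cs n i (k + 1) fuel
    else k

-- loop body of A: z[i] starts at 0 (read back from z), extended by the while loop
def pvStepA (cs : List Char) (n : Int) (z : List Int) (i : Int) : List Int :=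
  PySem.List.pySetD z i (pvExtend cs n i (PySem.List.pyGetD z i 0) n.toNat)

def sumScores (s : String) : Int :=
  let cs := s.toList
  let n : Int := PySem.Str.len s
  let z := (PySem.List.pyRange 1 n 1).foldl (pvStepA cs n) (List.replicate n.toNat 0)
  (z ++ [0]).sum + n

-- ===== PORT B =====
-- loop body of B: state (z, l, r); k starts from the window, z[i - l] is
-- provably in range there (0 ≤ i - l < len z), so pyGetD's default is dead
def pvStepB (cs : List Char) (n : Int) (st : List Int × Int × Int) (i : Int) :
    List Int × Int × Int :=
  let z := st.1
  let l := st.2.1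
  let r := st.2.2
  let k0 : Int := if i < r then min (r - i) (PySem.List.pyGetD z (i - l) 0) else 0
  let k := pvExtend cs n i k0 n.toNat
  let z' := PySem.List.pySetD z i k
  if i + k > r then (z', i, i + k) else (z', l, r)

def sumScores_alt (s : String) : Int :=
  let cs := s.toList
  let n : Int := PySem.Str.len s
  let st := (PySem.List.pyRange 1 n 1).foldl (pvStepB cs n) (List.replicate n.toNat 0, 0, 0)
  st.1.sum + n

-- ===== PRECONDITION & SPEC =====
def Spec_sumScores (s : String) (out : Int) : Prop := out = sumScores_alt s
instance (s : String) (out : Int) : Decidable (Spec_sumScores s out) := by unfold Spec_sumScores; infer_instance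

-- ===== CLAIM (what is proved, stated in full; the proofs are below) =====
def Claim_equal_sumScores : Prop := ∀ (s : String), Dom_sumScores s → Spec_sumScores s (sumScores s)

-- ===== LEMMAS AND PROOFS =====

-- longest common prefix of two character lists (the value z[i] computes)
def pvLcp : List Char → List Char → Nat
  | a :: as, b :: bs => if a = b then pvLcp as bs + 1 else 0
  | _, _ => 0

lemma pvLcp_le_left : ∀ (a b : List Char), pvLcp a b ≤ a.length := by
  intro a
  induction a with
  | nil => intro b; simp [pvLcp]
  | cons x as ih =>
    intro b
    cases b with
    | nil => simp [pvLcp]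
    | cons y bs =>
      simp only [pvLcp, List.length_cons]
      split
      · exact Nat.succ_le_succ (ih bs)
      · omega

lemma pvLcp_le_right : ∀ (a b : List Char), pvLcp a b ≤ b.length := by
  intro a
  induction a with
  | nil => intro b; simp [pvLcp]
  | cons x as ih =>
    intro b
    cases b with
    | nil => simp [pvLcp]
    | cons y bs =>
      simp only [pvLcp, List.length_cons]
      split
      · exact Nat.succ_le_succ (ih bs)
      · omega

lemma pvLcp_get : ∀ (a b : List Char) (j : Nat), j < pvLcp a b → a[j]? = b[j]? := by
  intro a
  induction a with
  | nil => intro b j h; simp [pvLcp] at h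
  | cons x as ih =>
    intro b j h
    cases b with
    | nil => simp [pvLcp] at h
    | cons y bs =>
      simp only [pvLcp] at h
      split at h
      · cases j with
        | zero => simp_all
        | succ j => simpa using ih bs j (by omega)
      · omega

lemma pvLcp_stop : ∀ (a b : List Char), pvLcp a b < a.length → pvLcp a b < b.length →
    a[pvLcp a b]? ≠ b[pvLcp a b]? := by
  intro a
  induction a with
  | nil => intro b h _; simp at h
  | cons x as ih =>
    intro b h1 h2
    cases b with
    | nil => simp at h2
    | cons y bs =>
      simp only [pvLcp] at *
      split_ifs with hxy
      · simp only [hxy, if_true, List.length_cons] at h1 h2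
        simpa using ih bs (by omega) (by omega)
      · simpa using hxy

lemma le_pvLcp : ∀ (a b : List Char) (m : Nat), m ≤ a.length → m ≤ b.length →
    (∀ j, j < m → a[j]? = b[j]?) → m ≤ pvLcp a b := by
  intro a
  induction a with
  | nil => intro b m h _ _; simp at h; omega
  | cons x as ih =>
    intro b m h1 h2 hj
    cases m with
    | zero => omega
    | succ m =>
      cases b with
      | nil => simp at h2
      | cons y bs =>
        have h0 := hj 0 (by omega)
        simp at h0
        simp only [pvLcp, h0, if_true]
        have := ih bs m (by simpa using h1) (by simpa using h2)
          (fun j hjm => by simpa using hj (j+1) (by omega))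
        omega

-- the shared while loop computes exactly the lcp of s and s[i:], from any sound start k
lemma pvExtend_eq (cs : List Char) (i : Nat) (hi : 1 ≤ i) : ∀ (fuel k : Nat),
    k ≤ pvLcp cs (cs.drop i) → pvLcp cs (cs.drop i) - k ≤ fuel →
    pvExtend cs (cs.length : Int) (i : Int) (k : Int) fuel = (pvLcp cs (cs.drop i) : Int) := by
  intro fuel
  induction fuel with
  | zero =>
    intro k hk hf
    simp only [pvExtend]
    omega
  | succ fuel ih =>
    intro k hk hf
    rcases Nat.lt_or_ge k (pvLcp cs (cs.drop i)) with hlt | hge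
    · have hkd : k < (cs.drop i).length := Nat.lt_of_lt_of_le hlt (pvLcp_le_right _ _)
      have hik : i + k < cs.length := by
        simp [List.length_drop] at hkd; omega
      have hget : cs[k]? = cs[i + k]? := by
        have := pvLcp_get cs (cs.drop i) k hlt
        rwa [List.getElem?_drop] at this
      rw [pvExtend, if_pos]
      · have : ((k : Int) + 1) = ((k + 1 : Nat) : Int) := by push_cast; ring
        rw [this]
        exact ih (k + 1) (by omega) (by omega)
      · constructor
        · omega
        · rw [PySem.List.pyGet?_natCast,
            show ((i : Int) + (k : Int)) = ((i + k : Nat) : Int) by push_cast; ring,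
            PySem.List.pyGet?_natCast, hget]
    · have hke : k = pvLcp cs (cs.drop i) := by omega
      subst hke
      rw [pvExtend, if_neg]
      rintro ⟨hc1, hc2⟩
      have hik : i + pvLcp cs (cs.drop i) < cs.length := by omega
      have hlt1 : pvLcp cs (cs.drop i) < cs.length := by omega
      have hlt2 : pvLcp cs (cs.drop i) < (cs.drop i).length := by
        simp [List.length_drop]; omega
      apply pvLcp_stop cs (cs.drop i) hlt1 hlt2
      rw [List.getElem?_drop]
      rw [PySem.List.pyGet?_natCast,
        show ((i : Int) + ((pvLcp cs (cs.drop i)) : Int))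
          = ((i + pvLcp cs (cs.drop i) : Nat) : Int) by push_cast; ring,
        PySem.List.pyGet?_natCast] at hc2
      exact hc2

-- the z array after processing indices 1 .. m-1
def pvPartial (cs : List Char) (m : Nat) : List Int :=
  (List.range cs.length).map (fun p => if 1 ≤ p ∧ p < m then (pvLcp cs (cs.drop p) : Int) else 0)

lemma pvPartial_zero (cs : List Char) : pvPartial cs 0 = List.replicate cs.length 0 := by
  simp [pvPartial, List.map_const']

lemma pvPartial_one (cs : List Char) : pvPartial cs 1 = List.replicate cs.length 0 := by
  have h : ∀ p : Nat, (if 1 ≤ p ∧ p < 1 then (pvLcp cs (cs.drop p) : Int) else 0) = 0 := by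
    intro p; split_ifs with h
    · omega
    · rfl
  unfold pvPartial
  rw [List.map_congr_left (fun p _ => h p), List.map_const', List.length_range]

lemma pvPartial_getD (cs : List Char) (m p : Nat) (hp : p < cs.length) :
    (pvPartial cs m).getD p 0 = if 1 ≤ p ∧ p < m then (pvLcp cs (cs.drop p) : Int) else 0 := by
  simp [pvPartial, List.getD_eq_getElem?_getD, hp]

lemma pvPartial_set (cs : List Char) (m : Nat) (h1 : 1 ≤ m) (h2 : m < cs.length) :
    (pvPartial cs m).set m (pvLcp cs (cs.drop m) : Int) = pvPartial cs (m + 1) := by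
  apply List.ext_getElem
  · simp [pvPartial]
  · intro p hpl hpr
    simp only [pvPartial, List.length_set, List.length_map, List.length_range] at hpl hpr ⊢
    simp only [List.getElem_set, List.getElem_map, List.getElem_range]
    split_ifs <;> first | rfl | omega | (subst_vars; simp_all)

lemma pvLcp_drop_le (cs : List Char) (i : Nat) : pvLcp cs (cs.drop i) ≤ cs.length - i := by
  have := pvLcp_le_right cs (cs.drop i)
  simpa [List.length_drop] using this

lemma pvStepA_eq (cs : List Char) (m : Nat) (h1 : 1 ≤ m) (h2 : m < cs.length) :
    pvStepA cs (cs.length : Int) (pvPartial cs m) (m : Int) = pvPartial cs (m + 1) := by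
  unfold pvStepA
  have hget : PySem.List.pyGetD (pvPartial cs m) (m : Int) 0 = 0 := by
    rw [PySem.List.pyGetD_natCast, pvPartial_getD cs m m h2]
    simp
  rw [hget]
  have hext := pvExtend_eq cs m h1 ((cs.length : Int)).toNat 0 (by omega)
    (by have := pvLcp_drop_le cs m; omega)
  rw [show ((0 : Nat) : Int) = (0 : Int) by rfl] at hext
  rw [hext, PySem.List.pySetD_natCast, pvPartial_set cs m h1 h2]

lemma foldA (cs : List Char) : ∀ m : Nat, m ≤ cs.length →
    (PySem.List.pyRange 1 (m : Int) 1).foldl (pvStepA cs (cs.length : Int))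
      (List.replicate cs.length 0) = pvPartial cs m := by
  intro m
  induction m with
  | zero =>
    intro _
    rw [PySem.List.pyRange_one_eq_nil (by omega)]
    simp [pvPartial_zero]
  | succ m ih =>
    intro hm
    rcases Nat.eq_zero_or_pos m with h0 | h1
    · subst h0
      rw [PySem.List.pyRange_one_eq_nil (by omega)]
      simp [pvPartial_one]
    · rw [show ((m + 1 : Nat) : Int) = (m : Int) + 1 by push_cast; ring,
        PySem.List.pyRange_one_succ_right (by omega), List.foldl_append]
      rw [ih (by omega)]
      simpa using pvStepA_eq cs m h1 (by omega)

-- one step of B preserves the window invariant and fills in z[m] = lcp(s, s[m:])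
lemma pvStepB_eq (cs : List Char) (m l r : Nat) (h1 : 1 ≤ m) (h2 : m < cs.length)
    (hl : l < m) (hlr : l ≤ r) (hr : r ≤ cs.length)
    (hw : r - l ≤ pvLcp cs (cs.drop l)) (hl0 : 1 ≤ l ∨ r = 0) :
    ∃ l' r' : Nat,
      pvStepB cs (cs.length : Int) (pvPartial cs m, (l : Int), (r : Int)) (m : Int)
        = (pvPartial cs (m + 1), (l' : Int), (r' : Int)) ∧
      l' < m + 1 ∧ l' ≤ r' ∧ r' ≤ cs.length ∧
      r' - l' ≤ pvLcp cs (cs.drop l') ∧ (1 ≤ l' ∨ r' = 0) := by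
  have hZmle : pvLcp cs (cs.drop m) ≤ cs.length - m := pvLcp_drop_le cs m
  obtain ⟨k0, hk0eq, hk0le⟩ :
      ∃ t : Nat, (if (m : Int) < (r : Int) then
          min ((r : Int) - (m : Int)) (PySem.List.pyGetD (pvPartial cs m) ((m : Int) - (l : Int)) 0)
        else 0) = (t : Int) ∧ t ≤ pvLcp cs (cs.drop m) := by
    by_cases hmr : m < r
    · have hl1 : 1 ≤ l := by omega
      have hml : ((m : Int) - (l : Int)) = ((m - l : Nat) : Int) := by omega
      rw [if_pos (by exact_mod_cast hmr), hml, PySem.List.pyGetD_natCast,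
        pvPartial_getD cs m (m - l) (by omega), if_pos ⟨by omega, by omega⟩,
        show ((r : Int) - (m : Int)) = ((r - m : Nat) : Int) by omega, ← Nat.cast_min]
      refine ⟨min (r - m) (pvLcp cs (cs.drop (m - l))), rfl, ?_⟩
      apply le_pvLcp cs (cs.drop m)
      · have := pvLcp_le_left cs (cs.drop (m - l)); omega
      · simp only [List.length_drop]; omega
      · intro j hj
        rw [List.getElem?_drop]
        have e1 : cs[j]? = cs[(m - l) + j]? := by
          have := pvLcp_get cs (cs.drop (m - l)) j (by omega)
          rwa [List.getElem?_drop] at this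
        have e2 : cs[(m - l) + j]? = cs[l + ((m - l) + j)]? := by
          have := pvLcp_get cs (cs.drop l) ((m - l) + j) (by omega)
          rwa [List.getElem?_drop] at this
        rw [e1, e2, show l + ((m - l) + j) = m + j by omega]
    · exact ⟨0, by rw [if_neg (by exact_mod_cast hmr)]; rfl, by omega⟩
  have hext : pvExtend cs (cs.length : Int) (m : Int) (k0 : Int) ((cs.length : Int)).toNat
      = ((pvLcp cs (cs.drop m)) : Int) :=
    pvExtend_eq cs m h1 _ k0 hk0le (by simp only [Int.toNat_natCast]; omega)
  unfold pvStepB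
  dsimp only
  rw [hk0eq, hext, PySem.List.pySetD_natCast, pvPartial_set cs m h1 h2]
  by_cases hbr : r < m + pvLcp cs (cs.drop m)
  · rw [if_pos (by omega)]
    exact ⟨m, m + pvLcp cs (cs.drop m), by push_cast; ring_nf, by omega, by omega,
      by omega, by omega, by omega⟩
  · rw [if_neg (by omega)]
    exact ⟨l, r, rfl, by omega, hlr, hr, hw, hl0⟩

lemma foldB (cs : List Char) : ∀ m : Nat, 1 ≤ m → m ≤ cs.length →
    ∃ l r : Nat,
      (PySem.List.pyRange 1 (m : Int) 1).foldl (pvStepB cs (cs.length : Int))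
        (List.replicate cs.length 0, 0, 0) = (pvPartial cs m, (l : Int), (r : Int)) ∧
      l < m ∧ l ≤ r ∧ r ≤ cs.length ∧
      r - l ≤ pvLcp cs (cs.drop l) ∧ (1 ≤ l ∨ r = 0) := by
  intro m
  induction m with
  | zero => omega
  | succ m ih =>
    intro _ hm
    rcases Nat.eq_zero_or_pos m with h0 | h1
    · subst h0
      refine ⟨0, 0, ?_, by omega, le_refl _, by omega, by omega, Or.inr rfl⟩
      rw [PySem.List.pyRange_one_eq_nil (by omega)]
      simp [pvPartial_one]
    · obtain ⟨l, r, heq, hl, hlr, hr, hw, hl0⟩ := ih h1 (by omega)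
      obtain ⟨l2, r2, heq2, hl2, hlr2, hr2, hw2, hl02⟩ :=
        pvStepB_eq cs m l r h1 (by omega) hl hlr hr hw hl0
      refine ⟨l2, r2, ?_, hl2, hlr2, hr2, hw2, hl02⟩
      rw [show ((m + 1 : Nat) : Int) = (m : Int) + 1 by push_cast; ring,
        PySem.List.pyRange_one_succ_right (by omega), List.foldl_append, heq]
      simpa using heq2

-- ===== VERDICT (by name: the statement is the Claim_ definition above) =====
theorem sumScores_spec : Claim_equal_sumScores := by
  intro s _
  unfold Spec_sumScores sumScores sumScores_alt
  dsimp only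
  rw [PySem.Str.len_eq]
  simp only [Int.toNat_natCast]
  rcases Nat.eq_zero_or_pos s.toList.length with h0 | h1
  · rw [PySem.List.pyRange_one_eq_nil (by omega)]
    simp [h0]
  · have hA := foldA s.toList s.toList.length (le_refl _)
    obtain ⟨l, r, heqB, -⟩ := foldB s.toList s.toList.length h1 (le_refl _)
    rw [hA, heqB]
    dsimp only
    rw [List.sum_append]
    simp
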